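-- pv_equiv track=rewrite | github.com/cindyxinyuzhang/binarysearch | 0301 Longest Alliteration.py | solve
-- ===== SOURCE A (Python) =====
-- def solve(words):
--     if not words: return 0
--
--     streak = 1
--     ans = 1
--
--     for i in range(1,len(words)):
--         if words[i][0] == words[i-1][0]: streak += 1
--         else: streak = 1
--         ans = max(ans, streak)
--
--     return ans
-- ===== SOURCE B (Python) =====
-- def solve(words):
--     # Two-pointer run scan: split the list into maximal runs of words sharing
--     # the same first slice w[:1], track the longest run length.
--     n = len(words)
--     best = 0
--     i = 0
--     while i < n:
--         c = words[i][:1]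
--         j = i + 1
--         while j < n and words[j][:1] == c:
--             j += 1
--         best = max(best, j - i)
--         i = j
--     return best
-- ===== Notes on version B (the rewrite author's own statement) =====
-- stated objective: alternative
-- what changed: A's single indexed pass keeping a running streak/ans pair is replaced by a run-splitting recursion that peels off the leading run of words sharing the same first slice w[:1] and recurses on the remainder; Pre_ excludes lists of two or more words containing an empty word, on which A raises IndexError (words[i][0]) while B keys by w[:1] and returns the longest run.
import Mathlib
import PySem

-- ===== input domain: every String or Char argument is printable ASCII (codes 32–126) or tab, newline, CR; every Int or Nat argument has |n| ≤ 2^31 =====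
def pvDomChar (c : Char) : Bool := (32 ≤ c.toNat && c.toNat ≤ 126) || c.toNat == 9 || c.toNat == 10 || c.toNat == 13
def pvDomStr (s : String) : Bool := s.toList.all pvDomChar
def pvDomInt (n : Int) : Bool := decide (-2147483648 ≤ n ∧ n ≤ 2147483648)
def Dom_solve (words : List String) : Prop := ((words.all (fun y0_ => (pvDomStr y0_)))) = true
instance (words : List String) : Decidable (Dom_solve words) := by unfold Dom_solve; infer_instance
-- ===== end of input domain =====

-- B replaces A's indexed streak/ans scan by a run-splitting recursion (peel the
-- leading run of equal first letters, recurse on the rest); objective: alternative decomposition.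

-- ===== PORT A =====
def solve (words : List String) : Int :=
  if words = [] then 0
  else
    let st := (PySem.List.pyRange 1 (words.length) 1).foldl
      (fun (st : Int × Int) i =>
        let streak : Int :=
          if PySem.Str.pyGet? (PySem.List.pyGetD words i "") 0 =
             PySem.Str.pyGet? (PySem.List.pyGetD words (i - 1) "") 0
          then st.1 + 1 else 1
        (streak, max st.2 streak)) (1, 1)
    st.2

-- ===== PORT B =====
-- inner while loop of Source B: advance j while j < n and words[j][:1] == c
def pvRunEnd (words : List String) (n : Nat) (c : String) (j : Nat) : Nat :=
  if j < n ∧ PySem.Str.slice (PySem.List.pyGetD words (j : Int) "") (some 0) (some 1) = c then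
    pvRunEnd words n c (j + 1)
  else j
termination_by n - j
decreasing_by omega

theorem pvRunEnd_ge (words : List String) (n : Nat) (c : String) :
    ∀ j, j ≤ pvRunEnd words n c j := by
  intro j
  induction hk : n - j using Nat.strong_induction_on generalizing j with
  | _ k ih =>
    rw [pvRunEnd]
    split
    · next h =>
      have h2 := ih (n - (j + 1)) (by omega) (j + 1) rfl
      omega
    · exact le_refl j

-- outer while loop of Source B over the run starts i, carrying best
def pvScan (words : List String) (n : Nat) (i : Nat) (best : Int) : Int :=
  if i < n then
    let c := PySem.Str.slice (PySem.List.pyGetD words (i : Int) "") (some 0) (some 1)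
    let j := pvRunEnd words n c (i + 1)
    pvScan words n j (max best ((j : Int) - (i : Int)))
  else best
termination_by n - i
decreasing_by
  have := pvRunEnd_ge words n (PySem.Str.slice (PySem.List.pyGetD words (i : Int) "") (some 0) (some 1)) (i + 1)
  omega

def solve_alt (words : List String) : Int := pvScan words words.length 0 0

-- ===== PRECONDITION & SPEC =====
-- Pre_ excludes lists of ≥ 2 words containing an empty word: there A raises
-- IndexError on words[i][0]; B groups by w[:1] and returns the longest run.
def Pre_solve (words : List String) : Prop :=
  words.length ≤ 1 ∨ ∀ w ∈ words, w ≠ ""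
instance (words : List String) : Decidable (Pre_solve words) := by unfold Pre_solve; infer_instance
def pvWitness_solve : List String := (["ab", "ac", "b", "ba", "bb", "bc", "c"])

def Spec_solve (words : List String) (out : Int) : Prop := out = solve_alt words
instance (words : List String) (out : Int) : Decidable (Spec_solve words out) := by unfold Spec_solve; infer_instance

-- ===== CLAIM (what is proved, stated in full; the proofs are below) =====
def Claim_equal_solve : Prop := ∀ (words : List String), Dom_solve words → Pre_solve words → Spec_solve words (solve words)

-- ===== LEMMAS AND PROOFS =====

-- keys: A compares first characters (Option Char), B compares one-character slices (String)
def keyA (w : String) : Option Char := PySem.Str.pyGet? w 0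
def keyB (w : String) : String := PySem.Str.slice w (some 0) (some 1)

-- proof-side reference: run-splitting recursion on the list itself
def pvTakeRun (c : String) : List String → Nat × List String
  | [] => (0, [])
  | w :: ws =>
    if keyB w = c then
      let p := pvTakeRun c ws
      (p.1 + 1, p.2)
    else (0, w :: ws)

theorem pvTakeRun_snd_length (c : String) (ws : List String) :
    (pvTakeRun c ws).2.length ≤ ws.length := by
  induction ws with
  | nil => simp [pvTakeRun]
  | cons w ws ih =>
    simp only [pvTakeRun]
    split
    · exact Nat.le_succ_of_le ih
    · simp

def pvR : List String → Int
  | [] => 0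
  | w :: rest =>
    let p := pvTakeRun (keyB w) rest
    max (1 + (p.1 : Int)) (pvR p.2)
termination_by ws => ws.length
decreasing_by
  simpa using Nat.lt_succ_of_le (pvTakeRun_snd_length _ rest)

-- common reference: longest streak continuation, parametric in the key function
def pvN {α : Type} [DecidableEq α] (key : String → α) : String → Int → List String → Int
  | _, s, [] => s
  | prev, s, w :: ws =>
    if key w = key prev then pvN key w (s + 1) ws else max s (pvN key w 1 ws)

theorem pvN_ge {α : Type} [DecidableEq α] (key : String → α) (ws : List String) :
    ∀ prev s, s ≤ pvN key prev s ws := by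
  induction ws with
  | nil => intro prev s; simp [pvN]
  | cons w ws ih =>
    intro prev s
    simp only [pvN]
    split
    · exact le_trans (by omega) (ih w (s + 1))
    · exact le_max_left _ _

theorem auxZ (w : String) (l : List String) :
    (List.range l.length).map (fun k => ((w :: l).getD k "", (w :: l).getD (k + 1) "")) =
    (w :: l).zip l := by
  induction l generalizing w with
  | nil => simp
  | cons v l ih =>
    rw [List.zip_cons_cons]
    simp only [List.length_cons, List.range_succ_eq_map, List.map_cons, List.map_map]
    refine congrArg₂ _ (by simp) ?_
    rw [← ih v]
    apply List.map_congr_left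
    intro k hk
    simp

-- A's fold over index pairs equals the zip-of-adjacent-pairs fold
theorem mapZ (words : List String) :
    (PySem.List.pyRange 1 (words.length) 1).map
      (fun i => (PySem.List.pyGetD words (i - 1) "", PySem.List.pyGetD words i "")) =
    words.zip words.tail := by
  rw [PySem.List.pyRange_one, List.map_map]
  have h : ((words.length : Int) - 1).toNat = words.length - 1 := by omega
  rw [h]
  cases words with
  | nil => simp
  | cons w l =>
    have hl : (w :: l).length - 1 = l.length := by simp
    rw [hl, List.tail_cons, ← auxZ w l]
    apply List.map_congr_left
    intro k hk
    simp only [Function.comp]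
    have h1 : (1 : Int) + (k : Int) - 1 = (k : Int) := by ring
    have h2 : (1 : Int) + (k : Int) = ((k + 1 : Nat) : Int) := by push_cast; ring
    rw [h1, h2, PySem.List.pyGetD_natCast, PySem.List.pyGetD_natCast]

theorem foldA (ws : List String) :
    ∀ (prev : String) (s a : Int), 1 ≤ s → s ≤ a →
    (((prev :: ws).zip ws).foldl
      (fun (st : Int × Int) p =>
        let streak : Int := if keyA p.2 = keyA p.1 then st.1 + 1 else 1
        (streak, max st.2 streak)) (s, a)).2 = max a (pvN keyA prev s ws) := by
  induction ws with
  | nil => intro prev s a h1 h2; simp [pvN]; omega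
  | cons w ws ih =>
    intro prev s a h1 h2
    rw [List.zip_cons_cons, List.foldl_cons]
    simp only [pvN]
    by_cases hk : keyA w = keyA prev
    · simp only [if_pos hk]
      rw [ih w (s+1) (max a (s+1)) (by omega) (by omega)]
      have := pvN_ge keyA ws w (s+1)
      omega
    · simp only [if_neg hk]
      rw [ih w 1 (max a 1) (by omega) (by omega)]
      have := pvN_ge keyA ws w 1
      omega

theorem solve_eq_pvN (w : String) (ws : List String) :
    solve (w :: ws) = pvN keyA w 1 ws := by
  rw [solve]
  rw [if_neg (by simp)]
  have hm := mapZ (w :: ws)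
  rw [List.tail_cons] at hm
  calc ((PySem.List.pyRange 1 ((w :: ws).length) 1).foldl
      (fun (st : Int × Int) i =>
        let streak : Int :=
          if PySem.Str.pyGet? (PySem.List.pyGetD (w :: ws) i "") 0 =
             PySem.Str.pyGet? (PySem.List.pyGetD (w :: ws) (i - 1) "") 0
          then st.1 + 1 else 1
        (streak, max st.2 streak)) (1, 1)).2
      = ((((w :: ws).zip ws)).foldl
          (fun (st : Int × Int) p =>
            let streak : Int := if keyA p.2 = keyA p.1 then st.1 + 1 else 1
            (streak, max st.2 streak)) (1, 1)).2 := by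
        rw [← hm, List.foldl_map]
        simp only [keyA]
        rfl
      _ = pvN keyA w 1 ws := by
        rw [foldA ws w 1 1 (by omega) (by omega)]
        have := pvN_ge keyA ws w 1
        omega

-- ==== B side: the index scan equals the run-splitting reference pvR ====

theorem pvTakeRun_fst_le (c : String) (l : List String) :
    (pvTakeRun c l).1 ≤ l.length := by
  induction l with
  | nil => simp [pvTakeRun]
  | cons w ws ih =>
    simp only [pvTakeRun]
    split
    · simpa using ih
    · simp

theorem pvTakeRun_snd_drop (c : String) (l : List String) :
    (pvTakeRun c l).2 = l.drop (pvTakeRun c l).1 := by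
  induction l with
  | nil => simp [pvTakeRun]
  | cons w ws ih =>
    simp only [pvTakeRun]
    split
    · simpa using ih
    · simp

theorem pvRunEnd_drop (words : List String) (c : String) :
    ∀ j, j ≤ words.length →
    pvRunEnd words words.length c j = j + (pvTakeRun c (words.drop j)).1 := by
  intro j
  induction hk : words.length - j using Nat.strong_induction_on generalizing j with
  | _ k ih =>
    intro hj
    rw [pvRunEnd]
    by_cases hlt : j < words.length
    · have hget : PySem.List.pyGetD words (j : Int) "" = words[j] := by
        rw [PySem.List.pyGetD_natCast]
        exact List.getD_eq_getElem _ _ hlt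
      have hdrop : words.drop j = words[j] :: words.drop (j + 1) :=
        List.drop_eq_getElem_cons hlt
      by_cases hc : keyB words[j] = c
      · rw [if_pos ⟨hlt, by rw [hget]; exact hc⟩]
        rw [ih (words.length - (j + 1)) (by omega) (j + 1) rfl (by omega)]
        rw [hdrop]
        simp only [pvTakeRun, if_pos hc]
        omega
      · rw [if_neg (by rintro ⟨-, h⟩; rw [hget] at h; exact hc h)]
        rw [hdrop]
        simp only [pvTakeRun, if_neg hc]
        simp
    · rw [if_neg (by rintro ⟨h, -⟩; omega)]
      have : j = words.length := by omega
      simp [this, pvTakeRun]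

theorem pvR_nonneg (l : List String) : 0 ≤ pvR l := by
  cases l with
  | nil => simp [pvR]
  | cons w ws =>
    rw [pvR]
    have : (0 : Int) ≤ 1 + ((pvTakeRun (keyB w) ws).1 : Int) := by positivity
    omega

theorem pvScan_eq (words : List String) :
    ∀ i (best : Int), i ≤ words.length → 0 ≤ best →
    pvScan words words.length i best = max best (pvR (words.drop i)) := by
  intro i
  induction hk : words.length - i using Nat.strong_induction_on generalizing i with
  | _ k ih =>
    intro best hi hb
    rw [pvScan]
    by_cases hlt : i < words.length
    · rw [if_pos hlt]
      have hget : PySem.List.pyGetD words (i : Int) "" = words[i] := by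
        rw [PySem.List.pyGetD_natCast]
        exact List.getD_eq_getElem _ _ hlt
      have hdrop : words.drop i = words[i] :: words.drop (i + 1) :=
        List.drop_eq_getElem_cons hlt
      rw [hget]
      have hre := pvRunEnd_drop words (keyB words[i]) (i + 1) (by omega)
      have hle := pvTakeRun_fst_le (keyB words[i]) (words.drop (i + 1))
      rw [List.length_drop] at hle
      show pvScan words words.length (pvRunEnd words words.length (keyB words[i]) (i + 1))
          (max best ((pvRunEnd words words.length (keyB words[i]) (i + 1) : Int) - (i : Int))) = _
      rw [hre]
      set t := (pvTakeRun (keyB words[i]) (words.drop (i + 1))).1 with ht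
      rw [ih (words.length - (i + 1 + t)) (by omega) (i + 1 + t) rfl
        (max best (((i + 1 + t : Nat) : Int) - (i : Int))) (by omega) (by omega)]
      have hdrop2 : words.drop (i + 1 + t) = (pvTakeRun (keyB words[i]) (words.drop (i + 1))).2 := by
        rw [pvTakeRun_snd_drop, ← ht]
        rw [List.drop_drop]
      rw [hdrop2, hdrop]
      rw [pvR]
      have hcast : ((i + 1 + t : Nat) : Int) - (i : Int) = 1 + (t : Int) := by push_cast; ring
      rw [hcast]
      have := pvR_nonneg (pvTakeRun (keyB words[i]) (words.drop (i + 1))).2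
      omega
    · rw [if_neg hlt]
      have : i = words.length := by omega
      simp only [this, List.drop_length, pvR]
      omega

theorem pvR_eq_pvN (w : String) (ws : List String) :
    pvR (w :: ws) = pvN keyB w 1 ws := by
  have key : ∀ l, ∀ (prev : String) (s : Int), 1 ≤ s →
      pvN keyB prev s l =
        max (s + ((pvTakeRun (keyB prev) l).1 : Int)) (pvR (pvTakeRun (keyB prev) l).2) := by
    intro l
    induction l with
    | nil =>
      intro prev s h1
      simp [pvN, pvTakeRun, pvR]
      omega
    | cons v vs ih =>
      intro prev s h1
      simp only [pvN, pvTakeRun]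
      by_cases hc : keyB v = keyB prev
      · simp only [if_pos hc]
        rw [ih v (s + 1) (by omega)]
        simp only [hc]
        push_cast
        ring_nf
      · simp only [if_neg hc]
        rw [ih v 1 (by omega)]
        rw [pvR]
        push_cast
        omega
  rw [pvR, key ws w 1 (by omega)]

theorem solve_alt_eq_pvN (w : String) (ws : List String) :
    solve_alt (w :: ws) = pvN keyB w 1 ws := by
  rw [solve_alt, pvScan_eq (w :: ws) 0 0 (by omega) (by omega)]
  rw [List.drop_zero, pvR_eq_pvN]
  have h1 := pvN_ge keyB ws w 1
  omega

theorem keyB_toList (s : String) : (keyB s).toList = s.toList.take 1 := by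
  simp [keyB, PySem.Str.slice]
  rw [PySem.List.slice_to _ (by omega)]
  norm_num

theorem toList_ne_nil (u : String) (hu : u ≠ "") : u.toList ≠ [] := by
  simpa [String.toList_eq_nil_iff] using hu

theorem key_iff (u v : String) (hu : u ≠ "") (hv : v ≠ "") :
    (keyA u = keyA v) = (keyB u = keyB v) := by
  have h0 : ∀ s : String, keyA s = s.toList[0]? := fun s => by
    simpa [keyA] using PySem.Str.pyGet?_natCast s 0
  have hB : (keyB u = keyB v) ↔ u.toList.take 1 = v.toList.take 1 := by
    rw [← keyB_toList, ← keyB_toList, String.toList_inj]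
  apply propext
  rw [h0, h0, hB]
  cases hcu : u.toList with
  | nil => exact absurd hcu (toList_ne_nil u hu)
  | cons a l =>
    cases hcv : v.toList with
    | nil => exact absurd hcv (toList_ne_nil v hv)
    | cons b m => simp

theorem pvN_key_eq (ws : List String) :
    ∀ prev, prev ≠ "" → (∀ w ∈ ws, w ≠ "") → ∀ s, pvN keyA prev s ws = pvN keyB prev s ws := by
  induction ws with
  | nil => intro prev _ _ s; simp [pvN]
  | cons w ws ih =>
    intro prev hprev hall s
    have hw : w ≠ "" := hall w (by simp)
    have hrest : ∀ v ∈ ws, v ≠ "" := fun v hv => hall v (by simp [hv])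
    simp only [pvN, key_iff w prev hw hprev, ih w hw hrest]

-- ===== VERDICT (by name: the statement is the Claim_ definition above) =====
theorem solve_spec : Claim_equal_solve := by
  intro words _ hpre
  unfold Spec_solve
  match words with
  | [] => rw [solve_alt, pvScan]; simp [solve]
  | [w] =>
    rw [solve_eq_pvN, solve_alt_eq_pvN]
    simp [pvN]
  | w :: v :: ws =>
    have hall : ∀ u ∈ w :: v :: ws, u ≠ "" := by
      rcases hpre with h | h
      · simp at h
      · exact h
    rw [solve_eq_pvN, solve_alt_eq_pvN]
    exact pvN_key_eq (v :: ws) w (hall w (by simp))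
      (fun u hu => hall u (by simp [hu] )) 1
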